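-- pv_equiv track=rewrite | github.com/foreverwow001/agent-workflow-template | .agent/runtime/scripts/workflow_core_manifest.py | pattern_anchor
-- ===== SOURCE A (Python) =====
-- def normalize_path(value: str) -> str:
--     path = str(value or "").strip()
--     if path.startswith("./"):
--         return path[2:]
--     return path
--
-- def pattern_anchor(pattern: str) -> str:
--     normalized = normalize_path(pattern)
--     if normalized.endswith("/**"):
--         return normalized[:-3].rstrip("/")
--     wildcard_positions = [normalized.find(char) for char in "*?[" if char in normalized]
--     if wildcard_positions:
--         position = min(pos for pos in wildcard_positions if pos >= 0)
--         return normalized[:position].rstrip("/")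
--     return normalized
-- ===== SOURCE B (Python) =====
-- def normalize_path(value: str) -> str:
--     path = str(value or "").strip()
--     if path.startswith("./"):
--         return path[2:]
--     return path
--
-- def pattern_anchor(pattern: str) -> str:
--     normalized = normalize_path(pattern)
--     if normalized.endswith("/**"):
--         return normalized[:-3].rstrip("/")
--     for i, c in enumerate(normalized):
--         if c in "*?[":
--             return normalized[:i].rstrip("/")
--     return normalized
-- ===== Notes on version B (the rewrite author's own statement) =====
-- stated objective: alternative
-- what changed: A computes find() for each of the three wildcard characters present and takes the min of those positions; B makes a single left-to-right scan over the normalized string and stops at the first wildcard character.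
import Mathlib
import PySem

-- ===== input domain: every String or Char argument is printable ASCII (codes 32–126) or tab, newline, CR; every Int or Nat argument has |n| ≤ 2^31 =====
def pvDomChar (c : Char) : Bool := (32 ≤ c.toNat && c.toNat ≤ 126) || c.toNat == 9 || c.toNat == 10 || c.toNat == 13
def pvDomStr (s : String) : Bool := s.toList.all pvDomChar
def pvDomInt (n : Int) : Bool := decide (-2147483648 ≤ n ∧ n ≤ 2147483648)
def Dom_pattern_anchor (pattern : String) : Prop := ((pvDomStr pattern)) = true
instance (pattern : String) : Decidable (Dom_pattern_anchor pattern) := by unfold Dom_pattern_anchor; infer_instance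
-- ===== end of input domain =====

-- B replaces A's three substring scans (`find` per wildcard char) plus `min` with a single
-- left-to-right scan for the first wildcard character: an alternative decomposition, one pass.

-- shared helper: exact port of Python s.rstrip("/") (strip set is a single char)
def rstripSlashL (cs : List Char) : List Char := (cs.reverse.dropWhile (· == '/')).reverse
def rstripSlash (s : String) : String := String.ofList (rstripSlashL s.toList)

-- shared helper normalize_path: `str(value or "")` on a str argument is the value itself
-- (empty string is falsy and yields ""), so it is .strip() followed by the "./" test
def normalize_path (value : String) : String :=
  let path := PySem.Str.strip value
  if PySem.Str.startswith path "./" then PySem.Str.slice path (some 2) none else path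

-- ===== PORT A =====
def pattern_anchor (pattern : String) : String :=
  let normalized := normalize_path pattern
  if PySem.Str.endswith normalized "/**" then
    rstripSlash (PySem.Str.slice normalized none (some (-3)))
  else
    -- [normalized.find(char) for char in "*?[" if char in normalized]
    let wildcard_positions :=
      ((['*', '?', '[']).filter (fun c => PySem.Chars.isIn [c] normalized.toList)).map
        (fun c => PySem.Chars.find normalized.toList [c])
    if wildcard_positions ≠ [] then
      -- min(pos for pos in wildcard_positions if pos >= 0)
      match PySem.List.min? (wildcard_positions.filter (fun p => decide (0 ≤ p))) (fun p => p) with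
      | some position => rstripSlash (PySem.Str.slice normalized none (some position))
      | none => normalized  -- unreachable: the list is nonempty and every find of a present char is ≥ 0
    else normalized

-- ===== PORT B =====
-- the `for i, c in enumerate(normalized): if c in "*?[": …` scan of Source B
def firstWildcard : List Char → Nat → Option Nat
  | [], _ => none
  | c :: rest, i =>
      if PySem.Chars.isIn [c] ['*', '?', '['] then some i else firstWildcard rest (i + 1)

def pattern_anchor_alt (pattern : String) : String :=
  let normalized := normalize_path pattern
  if PySem.Str.endswith normalized "/**" then
    rstripSlash (PySem.Str.slice normalized none (some (-3)))
  else
    match firstWildcard normalized.toList 0 with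
    | some i => rstripSlash (String.ofList (normalized.toList.take i))
    | none => normalized

-- ===== PRECONDITION & SPEC =====
def Spec_pattern_anchor (pattern : String) (out : String) : Prop := out = pattern_anchor_alt pattern
instance (pattern : String) (out : String) : Decidable (Spec_pattern_anchor pattern out) := by unfold Spec_pattern_anchor; infer_instance

-- ===== CLAIM (what is proved, stated in full; the proofs are below) =====
def Claim_equal_pattern_anchor : Prop := ∀ (pattern : String), Dom_pattern_anchor pattern → Spec_pattern_anchor pattern (pattern_anchor pattern)

-- ===== LEMMAS AND PROOFS =====

theorem singleton_prefix_iff {c : Char} {l : List Char} : [c] <+: l ↔ l.head? = some c := by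
  cases l with
  | nil => simp
  | cons x xs =>
    constructor
    · rintro ⟨t, ht⟩; simp at ht; simp [ht.1]
    · intro h; simp at h; exact ⟨xs, by simp [h]⟩

theorem singleton_prefix_drop_iff {c : Char} {l : List Char} {j : Nat} :
    [c] <+: l.drop j ↔ l[j]? = some c := by
  rw [singleton_prefix_iff, List.head?_drop]

theorem singleton_infix_iff {c : Char} {l : List Char} : [c] <:+: l ↔ c ∈ l := by
  constructor
  · intro h; exact (List.singleton_sublist).1 h.sublist
  · intro h
    obtain ⟨s, t, rfl⟩ := List.append_of_mem h
    exact ⟨s, t, by simp⟩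

theorem isIn_singleton_iff {c : Char} {l : List Char} :
    PySem.Chars.isIn [c] l = true ↔ c ∈ l := by
  rw [PySem.Chars.isIn_iff_infix, singleton_infix_iff]

-- B's scan is findIdx? for "is a wildcard char", offset by the accumulator
theorem firstWildcard_eq (cs : List Char) (k : Nat) :
    firstWildcard cs k
      = (cs.findIdx? (fun c => PySem.Chars.isIn [c] ['*', '?', '['])).map (fun j => k + j) := by
  induction cs generalizing k with
  | nil => simp [firstWildcard]
  | cons c rest ih =>
    rw [firstWildcard, List.findIdx?_cons]
    by_cases h : PySem.Chars.isIn [c] ['*', '?', '['] = true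
    · simp [h]
    · simp only [h, Bool.false_eq_true, if_false, ih (k + 1), Option.map_map]
      congr 1; funext j; simp; omega

-- when B's scan finds nothing, none of the three wildcard chars occurs in n
theorem wc_filter_nil (n : List Char)
    (h : n.findIdx? (fun c => PySem.Chars.isIn [c] ['*', '?', '[']) = none) :
    (['*', '?', '[']).filter (fun c => PySem.Chars.isIn [c] n) = [] := by
  have hall := List.findIdx?_eq_none_iff.1 h
  rw [List.filter_eq_nil_iff]
  intro c hc hcin
  have hcmem : c ∈ n := isIn_singleton_iff.1 hcin
  have hpc : PySem.Chars.isIn [c] ['*', '?', '['] = false := hall c hcmem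
  exact (Bool.eq_false_iff.1 hpc) (isIn_singleton_iff.2 hc)

-- when B's scan finds index i, A's position list is nonempty and its min (after the ≥ 0
-- filter) is exactly i
theorem wc_min_eq (n : List Char) (i : Nat)
    (h : n.findIdx? (fun c => PySem.Chars.isIn [c] ['*', '?', '[']) = some i) :
    ((['*', '?', '[']).filter (fun c => PySem.Chars.isIn [c] n)).map
        (fun c => PySem.Chars.find n [c]) ≠ []
    ∧ PySem.List.min?
        (((((['*', '?', '[']).filter (fun c => PySem.Chars.isIn [c] n)).map
          (fun c => PySem.Chars.find n [c]))).filter (fun p => decide (0 ≤ p)))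
        (fun p => p) = some (i : Int) := by
  obtain ⟨hilt, hpi, hleast⟩ := List.findIdx?_eq_some_iff_getElem.1 h
  have hci : n[i] ∈ (['*', '?', '['] : List Char) := isIn_singleton_iff.1 hpi
  have hmemn : n[i] ∈ n := List.getElem_mem hilt
  have hkeep : n[i] ∈ (['*', '?', '[']).filter (fun c => PySem.Chars.isIn [c] n) := by
    rw [List.mem_filter]
    exact ⟨hci, isIn_singleton_iff.2 hmemn⟩
  have hfindi : PySem.Chars.find n [n[i]] ∈
      ((['*', '?', '[']).filter (fun c => PySem.Chars.isIn [c] n)).map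
        (fun c => PySem.Chars.find n [c]) := List.mem_map_of_mem hkeep
  have hne : ((['*', '?', '[']).filter (fun c => PySem.Chars.isIn [c] n)).map
      (fun c => PySem.Chars.find n [c]) ≠ [] := by
    intro hnil; rw [hnil] at hfindi; exact List.not_mem_nil hfindi
  have hpos : ∀ q ∈ ((['*', '?', '[']).filter (fun c => PySem.Chars.isIn [c] n)).map
      (fun c => PySem.Chars.find n [c]), 0 ≤ q := by
    intro q hq
    obtain ⟨c, hc, rfl⟩ := List.mem_map.1 hq
    rw [List.mem_filter] at hc
    exact (PySem.Chars.find_nonneg_iff n [c]).2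
      ((PySem.Chars.isIn_iff_infix [c] n).1 (by simpa using hc.2))
  have hfeq : (((['*', '?', '[']).filter (fun c => PySem.Chars.isIn [c] n)).map
      (fun c => PySem.Chars.find n [c])).filter (fun p => decide (0 ≤ p))
      = ((['*', '?', '[']).filter (fun c => PySem.Chars.isIn [c] n)).map
        (fun c => PySem.Chars.find n [c]) :=
    List.filter_eq_self.2 (fun q hq => by simpa using hpos q hq)
  refine ⟨hne, ?_⟩
  rw [hfeq]
  cases hmin : PySem.List.min? (((['*', '?', '[']).filter (fun c => PySem.Chars.isIn [c] n)).map
      (fun c => PySem.Chars.find n [c])) (fun p => p) with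
  | none => exact absurd ((PySem.List.min?_eq_none_iff _ _).1 hmin) hne
  | some m =>
    have hmmem : m ∈ _ := PySem.List.min?_mem hmin
    have hmmin := PySem.List.min?_isMin hmin
    obtain ⟨w, hw, hmw⟩ := List.mem_map.1 hmmem
    rw [List.mem_filter] at hw
    have hmw' : PySem.Chars.find n [w] = m := by simpa using hmw
    have hm0 : 0 ≤ m := hpos m hmmem
    have hspec := PySem.Chars.find_spec (s := n) (sub := [w]) (by rw [hmw']; exact hm0)
    have hatm : n[m.toNat]? = some w := by
      rw [← singleton_prefix_drop_iff, ← hmw']; exact hspec.1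
    have hlt2 : m.toNat < n.length := by
      by_contra hge
      rw [Nat.not_lt] at hge
      simp [List.getElem?_eq_none hge] at hatm
    have hw2 : n[m.toNat] = w := by
      have := List.getElem?_eq_some_iff.1 hatm
      obtain ⟨h', hv⟩ := this; exact hv
    have hile : i ≤ m.toNat := by
      by_contra hlt
      rw [Nat.not_le] at hlt
      apply hleast m.toNat hlt
      simp only [isIn_singleton_iff, hw2]
      exact hw.1
    have hfle : PySem.Chars.find n [n[i]] ≤ (i : Int) := by
      have h0 : 0 ≤ PySem.Chars.find n [n[i]] :=
        (PySem.Chars.find_nonneg_iff n [n[i]]).2 (singleton_infix_iff.2 hmemn)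
      have hspec2 := PySem.Chars.find_spec (s := n) (sub := [n[i]]) h0
      by_contra hgt
      rw [not_le] at hgt
      have hlt' : i < (PySem.Chars.find n [n[i]]).toNat := by omega
      exact hspec2.2 i hlt' (singleton_prefix_drop_iff.2 (by simp [hilt]))
    have h1 : m ≤ (i : Int) := le_trans (hmmin _ hfindi) hfle
    have : m = (i : Int) := by omega
    rw [this]

-- rstripSlash only depends on toList
theorem rstripSlash_congr {s t : String} (h : s.toList = t.toList) :
    rstripSlash s = rstripSlash t := by
  unfold rstripSlash; rw [h]

theorem pattern_anchor_eq_alt (pattern : String) :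
    pattern_anchor pattern = pattern_anchor_alt pattern := by
  unfold pattern_anchor pattern_anchor_alt
  set n := normalize_path pattern with hn
  by_cases hend : PySem.Str.endswith n "/**" = true
  · rw [if_pos hend, if_pos hend]
  · simp only [hend, Bool.false_eq_true, if_false]
    rw [firstWildcard_eq]
    cases hf : n.toList.findIdx? (fun c => PySem.Chars.isIn [c] ['*', '?', '[']) with
    | none =>
      rw [wc_filter_nil n.toList hf]
      simp
    | some i =>
      obtain ⟨hne, hmin⟩ := wc_min_eq n.toList i hf
      rw [if_pos hne, hmin]
      simp only [Option.map_some]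
      apply rstripSlash_congr
      rw [PySem.Str.toList_slice]
      simp only [PySem.Chars.slice_eq_listSlice]
      rw [PySem.List.slice_to n.toList (Int.natCast_nonneg i)]
      simp

-- ===== VERDICT (by name: the statement is the Claim_ definition above) =====
theorem pattern_anchor_spec : Claim_equal_pattern_anchor := by
  intro pattern _
  unfold Spec_pattern_anchor
  exact pattern_anchor_eq_alt pattern
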